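-- pv_equiv track=rewrite | github.com/DipakMandlik/Pi-Skills | backend/v2/config/rbac.py | get_inherited_roles
-- ===== SOURCE A (Python) =====
-- ROLE_HIERARCHY: dict[str, list[str]] = {
--     "OWNER": ["ADMIN", "MEMBER", "VIEWER"],
--     "ADMIN": ["MEMBER", "VIEWER"],
--     "MEMBER": ["VIEWER"],
--     "VIEWER": [],
-- }
--
-- def get_inherited_roles(role: str) -> set[str]:
--     role_upper = role.upper()
--     inherited = {role_upper}
--     queue = [role_upper]
--     while queue:
--         current = queue.pop(0)
--         for child in ROLE_HIERARCHY.get(current, []):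
--             if child not in inherited:
--                 inherited.add(child)
--                 queue.append(child)
--     return inherited
-- ===== SOURCE B (Python) =====
-- ROLE_HIERARCHY: dict[str, list[str]] = {
--     "OWNER": ["ADMIN", "MEMBER", "VIEWER"],
--     "ADMIN": ["MEMBER", "VIEWER"],
--     "MEMBER": ["VIEWER"],
--     "VIEWER": [],
-- }
--
-- def get_inherited_roles(role: str) -> set[str]:
--     inherited = {role.upper()}
--
--     def visit(current: str) -> None:
--         for child in ROLE_HIERARCHY.get(current, []):
--             if child not in inherited:
--                 inherited.add(child)
--                 visit(child)
--
--     visit(role.upper())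
--     return inherited
-- ===== Notes on version B (the rewrite author's own statement) =====
-- stated objective: alternative
-- what changed: Replaces the explicit FIFO-queue BFS loop with a recursive DFS (a nested visit function recursing into each newly discovered child), keeping inherited as the only shared state.
import Mathlib
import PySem

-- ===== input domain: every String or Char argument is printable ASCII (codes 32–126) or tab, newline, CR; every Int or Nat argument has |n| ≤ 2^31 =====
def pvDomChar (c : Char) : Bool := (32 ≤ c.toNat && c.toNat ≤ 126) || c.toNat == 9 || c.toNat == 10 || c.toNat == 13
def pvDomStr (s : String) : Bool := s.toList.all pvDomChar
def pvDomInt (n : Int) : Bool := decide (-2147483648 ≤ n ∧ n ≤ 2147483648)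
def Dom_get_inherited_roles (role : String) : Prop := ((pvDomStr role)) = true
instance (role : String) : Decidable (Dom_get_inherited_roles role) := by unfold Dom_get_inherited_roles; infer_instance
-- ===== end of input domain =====

-- B replaces A's explicit FIFO-queue BFS with a recursive DFS over the fixed hierarchy (alternative decomposition, same result).


-- ===== PORT A =====
def roleHierarchy : PySem.Dict String (List String) :=
  PySem.Dict.mk [("OWNER", ["ADMIN", "MEMBER", "VIEWER"]),
   ("ADMIN", ["MEMBER", "VIEWER"]),
   ("MEMBER", ["VIEWER"]),
   ("VIEWER", [])]

-- the while loop; fuel bounds the number of iterations (each queue entry was added to `inherited`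
-- when enqueued, and there are only 4 hierarchy roles plus the start, so 8 iterations always suffice)
def bfsLoop : Nat → List String → PySem.Set String → PySem.Set String
  | 0, _, inherited => inherited
  | _ + 1, [], inherited => inherited
  | fuel + 1, current :: queue, inherited =>
    let st := (PySem.Dict.getD roleHierarchy current []).foldl
      (fun (st : PySem.Set String × List String) child =>
        if st.1.contains child then st else (PySem.Set.add st.1 child, st.2 ++ [child]))
      (inherited, queue)
    bfsLoop fuel st.2 st.1

def get_inherited_roles (role : String) : List String :=
  let role_upper := PySem.Str.upper role
  bfsLoop 8 [role_upper] (PySem.Set.ofList [role_upper])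

-- ===== PORT B =====
-- recursive DFS `visit`; fuel bounds the recursion depth (hierarchy chains have length ≤ 4)
def dfsVisit : Nat → String → PySem.Set String → PySem.Set String
  | 0, _, inherited => inherited
  | fuel + 1, current, inherited =>
    (PySem.Dict.getD roleHierarchy current []).foldl
      (fun inh child =>
        if inh.contains child then inh else dfsVisit fuel child (PySem.Set.add inh child))
      inherited

def get_inherited_roles_alt (role : String) : List String :=
  let up := PySem.Str.upper role
  dfsVisit 4 up (PySem.Set.ofList [up])

-- ===== PRECONDITION & SPEC =====
def Spec_get_inherited_roles (role : String) (out : List String) : Prop := out = get_inherited_roles_alt role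
instance (role : String) (out : List String) : Decidable (Spec_get_inherited_roles role out) := by unfold Spec_get_inherited_roles; infer_instance

-- ===== CLAIM (what is proved, stated in full; the proofs are below) =====
def Claim_equal_get_inherited_roles : Prop := ∀ (role : String), Dom_get_inherited_roles role → Spec_get_inherited_roles role (get_inherited_roles role)

-- ===== LEMMAS AND PROOFS =====

-- both programs depend on the input only through role.upper(); compare them as functions of that string
theorem core_eq (s : String) :
    bfsLoop 8 [s] (PySem.Set.ofList [s]) = dfsVisit 4 s (PySem.Set.ofList [s]) := by
  by_cases h1 : s = "OWNER"
  · subst h1; decide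
  by_cases h2 : s = "ADMIN"
  · subst h2; decide
  by_cases h3 : s = "MEMBER"
  · subst h3; decide
  by_cases h4 : s = "VIEWER"
  · subst h4; decide
  -- s is not a hierarchy key: the lookup yields [], both sides return {s}
  have hget : PySem.Dict.getD roleHierarchy s [] = [] := by
    simp [roleHierarchy, PySem.Dict.getD, Ne.symm h1, Ne.symm h2, Ne.symm h3, Ne.symm h4,
          PySem.Dict.get?]
  simp [bfsLoop, dfsVisit, hget]

-- ===== VERDICT (by name: the statement is the Claim_ definition above) =====
theorem get_inherited_roles_spec : Claim_equal_get_inherited_roles := by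
  intro role _
  unfold Spec_get_inherited_roles get_inherited_roles get_inherited_roles_alt
  exact core_eq (PySem.Str.upper role)
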